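-- pv_equiv track=rewrite | github.com/Guilherme-Regio/Alivescan | util/structure.py | get_cidr
-- ===== SOURCE A (Python) =====
-- def get_cidr(ipaddr):
--
--     cont = 0
--     range = ""
--
--     #Extrair o range de rede
--     for s in ipaddr:
--         if s == ".":
--             cont += 1
--         range += s
--         if cont == 3:
--             break
--
--     network_cidr = range + "0/24"
--     return str(network_cidr)
-- ===== SOURCE B (Python) =====
-- def get_cidr(ipaddr):
--     parts = ipaddr.split('.')
--     if len(parts) > 3:
--         prefix = '.'.join(parts[:3]) + '.'
--     else:
--         prefix = ipaddr
--     return prefix + '0/24'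
-- ===== Notes on version B (the rewrite author's own statement) =====
-- stated objective: simpler
-- what changed: B tokenizes the address with str.split on the dot separator and reassembles the first three octets with str.join (keeping the whole string when there are fewer than three separators), instead of A's character-by-character scan with a separator counter and break.
import Mathlib
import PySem

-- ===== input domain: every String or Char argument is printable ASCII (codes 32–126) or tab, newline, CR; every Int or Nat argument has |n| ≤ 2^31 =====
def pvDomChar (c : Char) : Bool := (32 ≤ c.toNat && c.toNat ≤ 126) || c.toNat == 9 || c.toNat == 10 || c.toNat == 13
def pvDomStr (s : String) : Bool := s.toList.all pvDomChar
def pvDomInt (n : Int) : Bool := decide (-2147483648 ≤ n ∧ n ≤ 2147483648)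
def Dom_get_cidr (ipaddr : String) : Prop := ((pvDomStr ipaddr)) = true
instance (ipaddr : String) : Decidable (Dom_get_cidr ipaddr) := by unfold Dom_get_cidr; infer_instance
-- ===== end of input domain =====

-- B replaces A's char-by-char scan (dot counter + break) with split('.')/join; same result, simpler.

-- ===== PORT A =====
-- A's for-loop with `cont`, the accumulated `range` string, and the break on cont == 3.
def get_cidr_loop : List Char → Nat → List Char → List Char
  | [], _, acc => acc
  | c :: rest, cont, acc =>
    let cont' := if c = '.' then cont + 1 else cont
    let acc' := acc ++ [c]
    if cont' = 3 then acc' else get_cidr_loop rest cont' acc'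

def get_cidr (ipaddr : String) : String :=
  String.ofList (get_cidr_loop ipaddr.toList 0 [] ++ ['0', '/', '2', '4'])

-- ===== PORT B =====
def get_cidr_alt (ipaddr : String) : String :=
  let parts := PySem.Chars.splitOn ipaddr.toList ['.']
  let pre := if parts.length > 3
    then PySem.Chars.join ['.'] (PySem.List.slice parts none (some 3)) ++ ['.']
    else ipaddr.toList
  String.ofList (pre ++ ['0', '/', '2', '4'])

-- ===== PRECONDITION & SPEC =====
def Spec_get_cidr (ipaddr : String) (out : String) : Prop := out = get_cidr_alt ipaddr
instance (ipaddr : String) (out : String) : Decidable (Spec_get_cidr ipaddr out) := by unfold Spec_get_cidr; infer_instance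

-- ===== CLAIM (what is proved, stated in full; the proofs are below) =====
def Claim_equal_get_cidr : Prop := ∀ (ipaddr : String), Dom_get_cidr ipaddr → Spec_get_cidr ipaddr (get_cidr ipaddr)

-- ===== LEMMAS AND PROOFS =====

-- chars up to and including the k-th '.', or the whole list if there are fewer dots
def prefixDots : Nat → List Char → List Char
  | _, [] => []
  | k, c :: rest =>
    if c = '.' then (if k = 1 then ['.'] else '.' :: prefixDots (k - 1) rest)
    else c :: prefixDots k rest

-- simple structural model of splitting on '.'
def splitDot (pre : List Char) : List Char → List (List Char)
  | [] => [pre]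
  | c :: rest => if c = '.' then pre :: splitDot [] rest else splitDot (pre ++ [c]) rest

theorem splitDot_cons_dot (pre rest : List Char) :
    splitDot pre ('.' :: rest) = pre :: splitDot [] rest := by simp [splitDot]

theorem splitDot_cons_ne (pre rest : List Char) {c : Char} (hc : c ≠ '.') :
    splitDot pre (c :: rest) = splitDot (pre ++ [c]) rest := by simp [splitDot, hc]

theorem prefixDots_cons_dot (k : Nat) (rest : List Char) :
    prefixDots k ('.' :: rest) = if k = 1 then ['.'] else '.' :: prefixDots (k - 1) rest := by
  simp [prefixDots]

theorem prefixDots_cons_ne (k : Nat) (rest : List Char) {c : Char} (hc : c ≠ '.') :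
    prefixDots k (c :: rest) = c :: prefixDots k rest := by simp [prefixDots, hc]

theorem count_cons_dot (rest : List Char) :
    ('.' :: rest).count '.' = rest.count '.' + 1 := by simp

theorem count_cons_ne (rest : List Char) {c : Char} (hc : c ≠ '.') :
    (c :: rest).count '.' = rest.count '.' := by
  simp only [List.count_cons]
  simp [hc]

theorem splitOn_go_eq (fuel : Nat) (l cur : List Char) (acc : List (List Char))
    (h : l.length < fuel) :
    PySem.Chars.splitOn.go ['.'] fuel l cur acc = acc.reverse ++ splitDot cur.reverse l := by
  induction fuel generalizing l cur acc with
  | zero => omega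
  | succ fuel ih =>
    cases l with
    | nil => simp [PySem.Chars.splitOn.go, splitDot]
    | cons c rest =>
      by_cases hc : c = '.'
      · subst hc
        have hpre : (['.'].isPrefixOf ('.' :: rest)) = true := by
          simp [List.isPrefixOf]
        simp only [PySem.Chars.splitOn.go, hpre, if_true]
        rw [show List.drop (['.'] : List Char).length ('.' :: rest) = rest from rfl]
        rw [ih rest [] (cur.reverse :: acc) (by simp at h; omega)]
        rw [splitDot_cons_dot]
        simp
      · have hpre : (['.'].isPrefixOf (c :: rest)) = false := by
          simp [List.isPrefixOf]
          exact fun hh => absurd hh.symm hc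
        simp only [PySem.Chars.splitOn.go, hpre, Bool.false_eq_true, if_false]
        rw [ih rest (c :: cur) acc (by simp at h; omega)]
        rw [splitDot_cons_ne _ _ hc]
        simp

theorem splitOn_eq_splitDot (cs : List Char) :
    PySem.Chars.splitOn cs ['.'] = splitDot [] cs := by
  unfold PySem.Chars.splitOn
  rw [splitOn_go_eq (cs.length + 1) cs [] [] (Nat.lt_succ_self _)]
  simp

theorem splitDot_length (cs : List Char) (pre : List Char) :
    (splitDot pre cs).length = cs.count '.' + 1 := by
  induction cs generalizing pre with
  | nil => simp [splitDot]
  | cons c rest ih =>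
    by_cases hc : c = '.'
    · subst hc; rw [splitDot_cons_dot, count_cons_dot]; simp [ih]
    · rw [splitDot_cons_ne _ _ hc, count_cons_ne _ hc, ih]

theorem prefixDots_of_few (k : Nat) (cs : List Char) (h : cs.count '.' < k) :
    prefixDots k cs = cs := by
  induction cs generalizing k with
  | nil => simp [prefixDots]
  | cons c rest ih =>
    by_cases hc : c = '.'
    · subst hc
      rw [count_cons_dot] at h
      have hk : k ≠ 1 := by omega
      rw [prefixDots_cons_dot, if_neg hk, ih (k - 1) (by omega)]
    · rw [count_cons_ne _ hc] at h
      rw [prefixDots_cons_ne _ _ hc, ih k h]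

theorem join_take_splitDot (k : Nat) (cs pre : List Char)
    (hk1 : 1 ≤ k) (h : k ≤ cs.count '.') :
    PySem.Chars.join ['.'] ((splitDot pre cs).take k) ++ ['.'] = pre ++ prefixDots k cs := by
  induction cs generalizing k pre with
  | nil => simp only [List.count_nil] at h; omega
  | cons c rest ih =>
    by_cases hc : c = '.'
    · subst hc
      rw [count_cons_dot] at h
      rw [splitDot_cons_dot, prefixDots_cons_dot]
      by_cases hk : k = 1
      · subst hk
        simp [PySem.Chars.join, List.intercalate]
      · obtain ⟨m, rfl⟩ : ∃ m, k = m + 1 := ⟨k - 1, by omega⟩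
        have hm1 : 1 ≤ m := by omega
        have hmc : m ≤ rest.count '.' := by omega
        rw [if_neg hk, List.take_succ_cons]
        obtain ⟨d, ds, hds⟩ : ∃ d ds, (splitDot ([] : List Char) rest).take m = d :: ds := by
          have hlen : 0 < ((splitDot ([] : List Char) rest).take m).length := by
            rw [List.length_take, splitDot_length]; omega
          cases hx : (splitDot ([] : List Char) rest).take m with
          | nil => rw [hx] at hlen; simp at hlen
          | cons d ds => exact ⟨d, ds, rfl⟩
        have hjoin : PySem.Chars.join ['.'] (pre :: (splitDot ([] : List Char) rest).take m)
            = pre ++ '.' :: PySem.Chars.join ['.'] ((splitDot ([] : List Char) rest).take m) := by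
          rw [hds]; simp [PySem.Chars.join, List.intercalate]
        rw [hjoin]
        have hih := ih m [] hm1 hmc
        simp only [List.nil_append] at hih
        simp only [Nat.add_sub_cancel, List.append_assoc, List.cons_append]
        rw [hih]
    · rw [count_cons_ne _ hc] at h
      rw [splitDot_cons_ne _ _ hc, prefixDots_cons_ne _ _ hc,
        ih k (pre ++ [c]) hk1 h]
      simp

theorem loopA_cons_dot (rest : List Char) (cont : Nat) (acc : List Char) :
    get_cidr_loop ('.' :: rest) cont acc =
      if cont + 1 = 3 then acc ++ ['.'] else get_cidr_loop rest (cont + 1) (acc ++ ['.']) := by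
  simp [get_cidr_loop]

theorem loopA_cons_ne (rest : List Char) (cont : Nat) (acc : List Char) {c : Char}
    (hc : c ≠ '.') :
    get_cidr_loop (c :: rest) cont acc =
      if cont = 3 then acc ++ [c] else get_cidr_loop rest cont (acc ++ [c]) := by
  simp [get_cidr_loop, hc]

theorem loop_eq_prefixDots (cs : List Char) (cont : Nat) (acc : List Char) (h : cont < 3) :
    get_cidr_loop cs cont acc = acc ++ prefixDots (3 - cont) cs := by
  induction cs generalizing cont acc with
  | nil => simp [get_cidr_loop, prefixDots]
  | cons c rest ih =>
    by_cases hc : c = '.'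
    · subst hc
      rw [loopA_cons_dot, prefixDots_cons_dot]
      by_cases h2 : cont = 2
      · subst h2; simp
      · have h3 : cont + 1 ≠ 3 := by omega
        have hk : 3 - cont ≠ 1 := by omega
        rw [if_neg h3, if_neg hk, ih (cont + 1) _ (by omega)]
        have h31 : 3 - (cont + 1) = 3 - cont - 1 := by omega
        simp [h31]
    · rw [loopA_cons_ne _ _ _ hc, prefixDots_cons_ne _ _ hc,
        if_neg (by omega : cont ≠ 3), ih cont _ h]
      simp

-- ===== VERDICT (by name: the statement is the Claim_ definition above) =====
theorem get_cidr_spec : Claim_equal_get_cidr := by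
  intro ipaddr _
  unfold Spec_get_cidr get_cidr
  simp only [get_cidr_alt, PySem.List.slice_to _ (by omega : (0:Int) ≤ 3),
    splitOn_eq_splitDot, splitDot_length]
  rw [loop_eq_prefixDots ipaddr.toList 0 [] (by omega)]
  by_cases h : 3 ≤ ipaddr.toList.count '.'
  · rw [if_pos (by omega)]
    rw [show ((3:Int).toNat) = 3 from rfl]
    rw [join_take_splitDot 3 ipaddr.toList [] (by omega) h]
  · rw [if_neg (by omega)]
    rw [show ((3:Nat) - 0) = 3 from rfl, prefixDots_of_few 3 ipaddr.toList (by omega)]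
    simp
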